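-- pv_equiv track=rewrite | github.com/Abhishek1098/CS_115 | labs/10/life_starter/life.py | innerCells
-- ===== SOURCE A (Python) =====
-- def createOneRow(width):
--     """Returns one row of zeros of width "width"...
--        You should use this in your
--        createBoard(width, height) function."""
--     row = []
--     for col in range(width):
--         row += [0]
--     return row
--
-- def createBoard(width, height):
--     """returns a 2d array with "height" rows and "width" cols"""
--     A = []
--     for row in range(height):
--         A += [createOneRow(width)]    # What do you need to add a whole row here?
--     return A
--
-- def innerCells(width, height):
--     """ creates a board and then modifies it to have a
--         border of 1s around the center
--     """
--     A = createBoard( width, height )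
--     for row in range(height):
--         for col in range(width):
--             A[row][col]= 0
--     for row in range(1, height-1):
--         for col in range(1, width-1):
--             A[row][col]= 1
--     return A
-- ===== SOURCE B (Python) =====
-- def innerCells(width, height):
--     """ creates a board and then modifies it to have a
--         border of 1s around the center
--     """
--     return [[1 if 0 < row < height - 1 and 0 < col < width - 1 else 0
--              for col in range(width)]
--             for row in range(height)]
-- ===== Notes on version B (the rewrite author's own statement) =====
-- stated objective: simpler
-- what changed: Replaces A's three passes (build rows of zeros, blanket-zero every cell, overwrite the inner region with 1s) by a single nested comprehension computing each cell directly from its position.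
import Mathlib
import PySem

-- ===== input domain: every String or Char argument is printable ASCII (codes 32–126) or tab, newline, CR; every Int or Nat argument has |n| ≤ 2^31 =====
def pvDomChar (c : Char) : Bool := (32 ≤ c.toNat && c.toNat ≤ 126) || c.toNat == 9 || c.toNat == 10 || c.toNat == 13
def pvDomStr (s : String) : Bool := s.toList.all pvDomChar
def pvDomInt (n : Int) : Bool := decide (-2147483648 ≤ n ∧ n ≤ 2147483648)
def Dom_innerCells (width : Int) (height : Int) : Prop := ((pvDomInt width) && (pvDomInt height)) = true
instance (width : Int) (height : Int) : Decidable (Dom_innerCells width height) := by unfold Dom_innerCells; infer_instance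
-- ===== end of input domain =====

-- ===== PORT A =====
-- A: build a board of zero rows, blanket-zero every cell, then overwrite the inner region with 1s.
-- Loop indices come from range(...) and are nonnegative and in range, so .toNat is exact here.
def createOneRow (width : Int) : List Int :=
  (PySem.List.pyRange 0 width 1).foldl (fun row _ => row ++ [0]) []

def createBoard (width : Int) (height : Int) : List (List Int) :=
  (PySem.List.pyRange 0 height 1).foldl (fun A _ => A ++ [createOneRow width]) []

def innerCells (width : Int) (height : Int) : List (List Int) :=
  let A0 := createBoard width height
  let A1 := (PySem.List.pyRange 0 height 1).foldl (fun A r =>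
    (PySem.List.pyRange 0 width 1).foldl (fun A c =>
      A.modify r.toNat (fun row => row.set c.toNat 0)) A) A0
  let A2 := (PySem.List.pyRange 1 (height - 1) 1).foldl (fun A r =>
    (PySem.List.pyRange 1 (width - 1) 1).foldl (fun A c =>
      A.modify r.toNat (fun row => row.set c.toNat 1)) A) A1
  A2

-- ===== PORT B =====
-- B: one pass, each cell computed directly from its position.
def innerCells_alt (width : Int) (height : Int) : List (List Int) :=
  (PySem.List.pyRange 0 height 1).map (fun row =>
    (PySem.List.pyRange 0 width 1).map (fun col =>
      if 0 < row ∧ row < height - 1 ∧ 0 < col ∧ col < width - 1 then (1 : Int) else 0))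

-- ===== PRECONDITION & SPEC =====
def Spec_innerCells (width : Int) (height : Int) (out : List (List Int)) : Prop := out = innerCells_alt width height
instance (width : Int) (height : Int) (out : List (List Int)) : Decidable (Spec_innerCells width height out) := by unfold Spec_innerCells; infer_instance

-- ===== CLAIM (what is proved, stated in full; the proofs are below) =====
def Claim_equal_innerCells : Prop := ∀ (width : Int) (height : Int), Dom_innerCells width height → Spec_innerCells width height (innerCells width height)

-- ===== LEMMAS AND PROOFS =====

-- building a row: appending [0] once per loop iteration yields a replicate
theorem pvRow0 (l : List Int) (acc : List Int) :
    l.foldl (fun row _ => row ++ [(0 : Int)]) acc = acc ++ List.replicate l.length 0 := by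
  induction l generalizing acc with
  | nil => simp
  | cons x xs ih => simp [List.foldl_cons, ih, List.replicate_succ]

theorem createOneRow_eq (w : Int) : createOneRow w = List.replicate w.toNat 0 := by
  unfold createOneRow
  rw [pvRow0]
  simp [PySem.List.length_pyRange_one]

theorem pvBoardAux (w : Int) (l : List Int) (acc : List (List Int)) :
    l.foldl (fun A _ => A ++ [createOneRow w]) acc = acc ++ List.replicate l.length (createOneRow w) := by
  induction l generalizing acc with
  | nil => simp
  | cons x xs ih => simp [List.foldl_cons, ih, List.replicate_succ]

theorem pvBoard (w h : Int) :
    createBoard w h = List.replicate h.toNat (List.replicate w.toNat 0) := by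
  unfold createBoard
  rw [pvBoardAux]
  simp [PySem.List.length_pyRange_one, createOneRow_eq]

-- modifying the same row index twice composes
theorem pv_modify_modify {α : Type} (A : List α) (k : Nat) (f g : α → α) :
    (A.modify k f).modify k g = A.modify k (fun x => g (f x)) := by
  apply List.ext_getElem?
  intro i
  simp only [List.getElem?_modify]
  cases A[i]? with
  | none => rfl
  | some r => by_cases h : k = i <;> simp [h]

-- a column loop of per-cell assignments into a fixed row index is one modify of that row
theorem pv_inner_eq (v : Int) (cs : List Int) (A : List (List Int)) (k : Nat) :
    cs.foldl (fun A c => A.modify k (fun row => row.set c.toNat v)) A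
      = A.modify k (fun row => cs.foldl (fun row c => row.set c.toNat v) row) := by
  induction cs generalizing A with
  | nil =>
      apply List.ext_getElem?
      intro i
      simp only [List.foldl_nil, List.getElem?_modify]
      cases A[i]? with
      | none => rfl
      | some r => by_cases h : k = i <;> simp [h]
  | cons c cs ih =>
      simp only [List.foldl_cons, ih, pv_modify_modify]

theorem pv_setv_len (v : Int) (cs : List Int) (row : List Int) :
    (cs.foldl (fun row c => row.set c.toNat v) row).length = row.length := by
  induction cs generalizing row with
  | nil => rfl
  | cons c cs ih => simp [List.foldl_cons, ih]

-- effect of the column loop on a single entry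
theorem pv_setv_get? (v : Int) (n : Nat) (a : Int) (row : List Int) (j : Nat) (ha : 0 ≤ a) :
    ((List.map (fun (k : Nat) => a + (k : Int)) (List.range n)).foldl
        (fun row c => row.set c.toNat v) row)[j]? =
      if a ≤ (j : Int) ∧ (j : Int) < a + n ∧ j < row.length then some v else row[j]? := by
  induction n with
  | zero => simp; try omega
  | succ m ih =>
      rw [List.range_succ, List.map_append, List.foldl_append]
      simp only [List.map_cons, List.map_nil, List.foldl_cons, List.foldl_nil]
      rw [List.getElem?_set, pv_setv_len]
      by_cases hk : (a + (m : Int)).toNat = j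
      · rw [if_pos hk]
        by_cases hl : j < row.length
        · rw [if_pos (by omega), if_pos (by omega)]
        · rw [if_neg (by omega), if_neg (by omega), List.getElem?_eq_none (by omega)]
      · rw [if_neg hk, ih]
        split_ifs with h1 h2 <;> first | rfl | (exfalso; omega)

-- effect of the row loop (one modify per distinct row index) on a single row
theorem pv_fill_get? (f : List Int → List Int) (n : Nat) (a : Int) (A : List (List Int))
    (i : Nat) (ha : 0 ≤ a) :
    ((List.map (fun (k : Nat) => a + (k : Int)) (List.range n)).foldl
        (fun A r => A.modify r.toNat f) A)[i]? =
      if a ≤ (i : Int) ∧ (i : Int) < a + n then f <$> A[i]? else A[i]? := by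
  induction n with
  | zero => simp; try omega
  | succ m ih =>
      rw [List.range_succ, List.map_append, List.foldl_append]
      simp only [List.map_cons, List.map_nil, List.foldl_cons, List.foldl_nil]
      rw [List.getElem?_modify, ih]
      by_cases hk : (a + (m : Int)).toNat = i
      · rw [if_neg (by omega), if_pos (by omega)]
        cases A[i]? with
        | none => rfl
        | some r => simp [hk]
      · split_ifs with h1 h2 <;>
          first
          | (exfalso; omega)
          | (cases A[i]? with
             | none => rfl
             | some r =>
                 simp only [Option.map_eq_map, Option.map_some]
                 try first | rfl | rw [if_neg hk])

theorem pv_main (w h : Int) : innerCells w h = innerCells_alt w h := by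
  have hzrow : ((List.map (fun (k : Nat) => (0 : Int) + (k : Int)) (List.range ((w : Int) - 0).toNat)).foldl
      (fun row c => row.set c.toNat (0 : Int)) (List.replicate w.toNat 0))
        = List.replicate w.toNat 0 := by
    apply List.ext_getElem?
    intro j
    rw [pv_setv_get? _ _ _ _ _ (by omega), List.length_replicate]
    split_ifs with hj
    · rw [List.getElem?_replicate, if_pos (by omega)]
    · rfl
  unfold innerCells innerCells_alt
  rw [pvBoard]
  rw [PySem.List.pyRange_one 0 h, PySem.List.pyRange_one 0 w,
      PySem.List.pyRange_one 1 (h - 1), PySem.List.pyRange_one 1 (w - 1)]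
  simp only [pv_inner_eq]
  apply List.ext_getElem?
  intro i
  rw [pv_fill_get? _ _ _ _ _ (by omega), pv_fill_get? _ _ _ _ _ (by omega),
      List.getElem?_replicate]
  by_cases hi : i < h.toNat
  · rw [if_pos hi]
    rw [if_pos (show (0 : Int) ≤ (i : Int) ∧ (i : Int) < 0 + (((h - 0).toNat : Int)) by omega)]
    simp only [Option.map_eq_map, Option.map_some]
    rw [hzrow, List.getElem?_map, List.getElem?_map,
        List.getElem?_range (show i < ((h : Int) - 0).toNat by omega)]
    simp only [Option.map_some]
    by_cases hmid : (1 : Int) ≤ (i : Int) ∧ (i : Int) < 1 + (((h - 1 - 1).toNat : Int))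
    · rw [if_pos hmid]
      refine congrArg some ?_
      apply List.ext_getElem?
      intro j
      rw [pv_setv_get? _ _ _ _ _ (by omega), List.length_replicate,
          List.getElem?_map, List.getElem?_map]
      by_cases hj : j < ((w : Int) - 0).toNat
      · rw [List.getElem?_range hj]
        simp only [Option.map_some, List.getElem?_replicate]
        split_ifs <;> first | rfl | (exfalso; omega)
      · rw [List.getElem?_eq_none (show (List.range ((w : Int) - 0).toNat).length ≤ j by simp; omega),
            List.getElem?_eq_none (show (List.replicate w.toNat (0 : Int)).length ≤ j by simp; omega)]
        simp only [Option.map_none]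
        rw [if_neg (by omega)]
    · rw [if_neg hmid]
      refine congrArg some ?_
      apply List.ext_getElem?
      intro j
      rw [List.getElem?_replicate, List.getElem?_map, List.getElem?_map]
      by_cases hj : j < ((w : Int) - 0).toNat
      · rw [List.getElem?_range hj]
        simp only [Option.map_some]
        rw [if_pos (by omega)]
        refine congrArg some ?_
        rw [if_neg (by omega)]
      · rw [List.getElem?_eq_none (show (List.range ((w : Int) - 0).toNat).length ≤ j by simp; omega)]
        simp only [Option.map_none]
        rw [if_neg (by omega)]
  · rw [if_neg hi]
    rw [List.getElem?_map,
        List.getElem?_eq_none (show (List.map (fun (k : Nat) => (0 : Int) + (k : Int)) (List.range ((h : Int) - 0).toNat)).length ≤ i by simp; omega)]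
    simp only [Option.map_eq_map, Option.map_none]
    split_ifs <;> rfl

-- ===== VERDICT (by name: the statement is the Claim_ definition above) =====
theorem innerCells_spec : Claim_equal_innerCells := by
  intro w h _
  unfold Spec_innerCells
  exact pv_main w h
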